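-- pv_equiv track=rewrite | github.com/hydrogendeuteride/NLPScratch | HMM/hmm.py | replace_quotes
-- ===== SOURCE A (Python) =====
-- def replace_quotes(sentence):
--     inside_quote = False
--     for i, word in enumerate(sentence):
--         if word == '"':
--             if inside_quote:
--                 sentence[i] = "''"
--                 inside_quote = False
--             else:
--                 sentence[i] = "``"
--                 inside_quote = True
--     return sentence
-- ===== SOURCE B (Python) =====
-- def replace_quotes(sentence):
--     positions = [i for i, w in enumerate(sentence) if w == '"']
--     for k, pos in enumerate(positions):
--         sentence[pos] = '``' if k % 2 == 0 else "''"
--     return sentence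
-- ===== Notes on version B (the rewrite author's own statement) =====
-- stated objective: alternative
-- what changed: Replaced the inline toggled-boolean single pass with a two-phase gather-then-assign shape: first collect the indices of all '"' tokens, then assign open/close markers by occurrence-rank parity.
import Mathlib
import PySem

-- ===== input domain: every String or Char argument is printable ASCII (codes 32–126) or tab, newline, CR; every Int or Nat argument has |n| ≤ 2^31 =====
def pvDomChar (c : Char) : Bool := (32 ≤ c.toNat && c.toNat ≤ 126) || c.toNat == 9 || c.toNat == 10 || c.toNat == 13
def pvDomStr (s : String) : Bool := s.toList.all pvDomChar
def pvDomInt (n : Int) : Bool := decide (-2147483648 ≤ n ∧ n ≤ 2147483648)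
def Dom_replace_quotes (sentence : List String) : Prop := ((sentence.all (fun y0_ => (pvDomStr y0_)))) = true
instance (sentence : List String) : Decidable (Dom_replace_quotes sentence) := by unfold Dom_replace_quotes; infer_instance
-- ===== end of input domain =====

-- ===== PORT A =====
-- A: single pass toggling an inside_quote boolean, rewriting each '"' in place.
-- B: two-phase gather-then-assign (same O(n) cost); A mutates the list in place, the equivalence is about the return value.
def replaceQuotesGo : List String → Bool → List String
  | [], _ => []
  | w :: ws, inside =>
    if w = "\"" then
      (if inside then "''" else "``") :: replaceQuotesGo ws (!inside)
    else
      w :: replaceQuotesGo ws inside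

def replace_quotes (sentence : List String) : List String :=
  replaceQuotesGo sentence false

-- ===== PORT B =====
-- B: gather the indices of all '"' tokens, then assign markers by occurrence-rank parity.
def quotePositions (sentence : List String) : List Int :=
  (PySem.List.enumerate sentence).filterMap
    (fun p => if p.2 = "\"" then some p.1 else none)

def replace_quotes_alt (sentence : List String) : List String :=
  (PySem.List.enumerate (quotePositions sentence)).foldl
    (fun acc kp =>
      PySem.List.pySetD acc kp.2 (if PySem.Int.mod kp.1 2 = 0 then "``" else "''"))
    sentence

-- ===== PRECONDITION & SPEC =====
def Spec_replace_quotes (sentence : List String) (out : List String) : Prop := out = replace_quotes_alt sentence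
instance (sentence : List String) (out : List String) : Decidable (Spec_replace_quotes sentence out) := by unfold Spec_replace_quotes; infer_instance

-- ===== CLAIM (what is proved, stated in full; the proofs are below) =====
def Claim_equal_replace_quotes : Prop := ∀ (sentence : List String), Dom_replace_quotes sentence → Spec_replace_quotes sentence (replace_quotes sentence)

-- ===== LEMMAS AND PROOFS =====

-- proof-only helper: apply assignments at positions ps, ranks starting at k
def applyB (s : List String) : List Int → Int → List String
  | [], _ => s
  | p :: ps, k =>
      applyB (PySem.List.pySetD s p (if PySem.Int.mod k 2 = 0 then "``" else "''")) ps (k + 1)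

theorem foldl_enumerate_eq_applyB (ps : List Int) (s : List String) (k : Int) :
    (PySem.List.enumerate ps k).foldl
      (fun acc kp =>
        PySem.List.pySetD acc kp.2 (if PySem.Int.mod kp.1 2 = 0 then "``" else "''")) s
    = applyB s ps k := by
  induction ps generalizing s k with
  | nil => simp only [PySem.List.enumerate_nil, List.foldl_nil, applyB]
  | cons p ps ih =>
      rw [PySem.List.enumerate_cons, List.foldl_cons]
      exact ih _ _

theorem enumerate_shift (ws : List String) (k : Int) :
    PySem.List.enumerate ws (k + 1)
      = (PySem.List.enumerate ws k).map (fun p => (p.1 + 1, p.2)) := by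
  induction ws generalizing k with
  | nil => simp [PySem.List.enumerate_nil]
  | cons w ws ih => simp [PySem.List.enumerate_cons, ih]

theorem quotePositions_cons (w : String) (ws : List String) :
    quotePositions (w :: ws)
      = (if w = "\"" then [(0 : Int)] else [])
        ++ (quotePositions ws).map (fun p => p + 1) := by
  have hshift : ∀ (E : List (Int × String)),
      List.filterMap (fun p => if p.2 = "\"" then some p.1 else none)
          (E.map (fun p => (p.1 + 1, p.2)))
        = (List.filterMap (fun p => if p.2 = "\"" then some p.1 else none) E).map
            (fun p => p + 1) := by
    intro E
    rw [List.filterMap_map, List.map_filterMap]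
    congr 1
    funext p
    by_cases hp : p.2 = "\"" <;> simp [hp]
  unfold quotePositions
  rw [PySem.List.enumerate_cons, enumerate_shift, List.filterMap_cons, hshift]
  by_cases h : w = "\"" <;> simp [h]

theorem applyB_cons_shift (w : String) (ws : List String) (ps : List Int) (k : Int)
    (hps : ∀ p ∈ ps, 0 ≤ p) :
    applyB (w :: ws) (ps.map (fun p => p + 1)) k = w :: applyB ws ps k := by
  induction ps generalizing w ws k with
  | nil => simp [applyB]
  | cons p ps ih =>
      have hp : 0 ≤ p := hps p (List.mem_cons_self ..)
      rw [List.map_cons, applyB,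
          PySem.List.pySetD_of_nonneg _ _ (show (0:Int) ≤ p + 1 by omega),
          show (p + 1).toNat = p.toNat + 1 by omega, List.set_cons_succ,
          ih _ _ _ (fun q hq => hps q (List.mem_cons_of_mem _ hq))]
      congr 1
      conv_rhs => rw [applyB, PySem.List.pySetD_of_nonneg _ _ hp]

theorem quotePositions_nonneg (ws : List String) : ∀ p ∈ quotePositions ws, 0 ≤ p := by
  intro p hp
  unfold quotePositions at hp
  obtain ⟨q, hq, hval⟩ := List.mem_filterMap.mp hp
  obtain ⟨j, hj, rfl⟩ := (PySem.List.mem_enumerate_iff _ _ _).mp hq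
  simp only at hval
  split at hval
  · simp only [Option.some.injEq] at hval
    omega
  · exact absurd hval (by simp)

theorem pymod_two (a : Int) : PySem.Int.mod a 2 = a % 2 := by
  simp [PySem.Int.mod, Int.fmod_eq_emod_of_nonneg]

theorem goA_eq_applyB (ws : List String) (k : Int) (hk : 0 ≤ k) :
    replaceQuotesGo ws (decide (PySem.Int.mod k 2 = 1))
      = applyB ws (quotePositions ws) k := by
  induction ws generalizing k with
  | nil => simp [replaceQuotesGo, quotePositions, PySem.List.enumerate_nil, applyB]
  | cons w ws ih =>
      rw [quotePositions_cons]
      by_cases h : w = "\""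
      · rw [if_pos h, List.singleton_append]
        subst h
        show replaceQuotesGo ("\"" :: ws) _ = applyB _ (0 :: _) k
        rw [replaceQuotesGo, if_pos rfl]
        show _ = applyB (PySem.List.pySetD ("\"" :: ws) 0 _) _ (k + 1)
        rw [PySem.List.pySetD_of_nonneg _ _ (by omega)]
        simp only [Int.toNat_zero, List.set_cons_zero]
        rw [applyB_cons_shift _ _ _ _ (quotePositions_nonneg ws)]
        have hm : k % 2 = 0 ∨ k % 2 = 1 := by omega
        have h2 := ih (k + 1) (by omega)
        rw [pymod_two] at h2 ⊢
        rcases hm with hm | hm <;>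
          [rw [show (k + 1) % 2 = 1 by omega] at h2;
           rw [show (k + 1) % 2 = 0 by omega] at h2] <;>
          norm_num at h2 <;>
          simp [hm, h2]
      · rw [if_neg h, List.nil_append]
        rw [replaceQuotesGo, if_neg h]
        rw [applyB_cons_shift _ _ _ _ (quotePositions_nonneg ws)]
        rw [ih k hk]

-- ===== VERDICT (by name: the statement is the Claim_ definition above) =====
theorem replace_quotes_spec : Claim_equal_replace_quotes := by
  intro sentence _
  unfold Spec_replace_quotes replace_quotes replace_quotes_alt
  rw [show (PySem.List.enumerate (quotePositions sentence)) = PySem.List.enumerate (quotePositions sentence) 0 from rfl,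
      foldl_enumerate_eq_applyB, ← goA_eq_applyB sentence 0 (by omega)]
  rfl
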